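-- pv_equiv track=rewrite | github.com/talisman6803/2019ProgrammingBasic | 중간고사/6,7,8. 재귀함수 변형하기.py | adjustW
-- ===== SOURCE A (Python) =====
-- def adjustW(ns):
--     rs = []
--     while len(ns) > 1:
--         if ns[0] < ns[1]:
--             rs += [ns[0]+1]
--         elif ns[0] > ns[1]:
--             rs += [ns[0]-1]
--         else:
--             rs += [ns[0]]
--         ns = ns[1:]
--     return rs + ns
-- ===== SOURCE B (Python) =====
-- def adjustW(ns):
--     n = len(ns)
--     out = [ns[i] + 1 if ns[i] < ns[i + 1] else ns[i] - 1 if ns[i] > ns[i + 1] else ns[i]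
--            for i in range(n - 1)]
--     return out + ns[n - 1:]
-- ===== Notes on version B (the rewrite author's own statement) =====
-- stated objective: faster
-- what changed: A repeatedly rebinds ns = ns[1:] (a fresh slice per step, quadratic copying) while appending to rs; B builds the result in a single index-based comprehension over range(n-1) with no slicing.
import Mathlib
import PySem

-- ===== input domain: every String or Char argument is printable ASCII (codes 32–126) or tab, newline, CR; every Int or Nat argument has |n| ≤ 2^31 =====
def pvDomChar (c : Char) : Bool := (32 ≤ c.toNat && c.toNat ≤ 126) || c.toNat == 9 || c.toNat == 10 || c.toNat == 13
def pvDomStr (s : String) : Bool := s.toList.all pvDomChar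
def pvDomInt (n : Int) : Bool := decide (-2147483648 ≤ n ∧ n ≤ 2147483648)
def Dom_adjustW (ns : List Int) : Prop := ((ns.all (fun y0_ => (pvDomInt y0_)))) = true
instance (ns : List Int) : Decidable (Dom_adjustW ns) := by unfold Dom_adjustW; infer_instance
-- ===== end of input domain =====

-- B replaces A's quadratic slice-and-repeat loop (ns = ns[1:] each step) by one
-- index-based pass over range(n-1); objective: faster (asymptotic).

-- ===== PORT A =====
-- A's while loop: state (ns, rs); each iteration appends one element to rs and
-- rebinds ns to its tail (ns[1:]); loop runs while len(ns) > 1.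
def adjustW_go (ns rs : List Int) : List Int :=
  match ns with
  | a :: b :: t =>
      adjustW_go (b :: t)
        (rs ++ [if a < b then a + 1 else if a > b then a - 1 else a])
  | _ => rs ++ ns

def adjustW (ns : List Int) : List Int := adjustW_go ns []

-- ===== PORT B =====
-- indices i and i+1 are in range for i < n-1, so getD is exact for ns[i]; ns[n-1:] = drop (n-1)
def adjustW_alt (ns : List Int) : List Int :=
  ((List.range (ns.length - 1)).map (fun i =>
      let a := ns.getD i 0
      let b := ns.getD (i + 1) 0
      if a < b then a + 1 else if a > b then a - 1 else a))
    ++ ns.drop (ns.length - 1)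

-- ===== PRECONDITION & SPEC =====
def Spec_adjustW (ns : List Int) (out : List Int) : Prop := out = adjustW_alt ns
instance (ns : List Int) (out : List Int) : Decidable (Spec_adjustW ns out) := by unfold Spec_adjustW; infer_instance

-- ===== CLAIM (what is proved, stated in full; the proofs are below) =====
def Claim_equal_adjustW : Prop := ∀ (ns : List Int), Dom_adjustW ns → Spec_adjustW ns (adjustW ns)

-- ===== LEMMAS AND PROOFS =====
theorem adjustW_alt_cons2 (a b : Int) (t : List Int) :
    adjustW_alt (a :: b :: t) =
      (if a < b then a + 1 else if a > b then a - 1 else a) :: adjustW_alt (b :: t) := by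
  simp only [adjustW_alt, List.length_cons]
  rw [show t.length + 1 + 1 - 1 = t.length + 1 from rfl,
      show t.length + 1 - 1 = t.length from rfl]
  rw [List.range_succ_eq_map]
  simp [List.map_map, Function.comp]

theorem adjustW_go_eq (ns rs : List Int) :
    adjustW_go ns rs = rs ++ adjustW_alt ns := by
  induction ns generalizing rs with
  | nil => simp [adjustW_go, adjustW_alt]
  | cons a t ih =>
      cases t with
      | nil => simp [adjustW_go, adjustW_alt]
      | cons b t' =>
          rw [adjustW_go, ih, adjustW_alt_cons2]
          simp

-- ===== VERDICT (by name: the statement is the Claim_ definition above) =====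
theorem adjustW_spec : Claim_equal_adjustW := by
  intro ns _
  unfold Spec_adjustW adjustW
  rw [adjustW_go_eq]
  simp
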